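-- pv_equiv track=rewrite | github.com/MylesTym/Wave-collapse | core/elevation.py | calculate_slopes
-- ===== SOURCE A (Python) =====
-- STEEP_SLOPE_THRESHOLD = 4
--
-- def calculate_slopes(heightmap):
--     # calculate slope
--     height = len(heightmap)
--     width = len(heightmap[0])
--     slopes = []
--
--     for y in range(height):
--         row = []
--         for x in range(width):
--             is_steep = False
--             current_height =heightmap[y][x]
--             # check all 8 neighbors
--             for dy in [-1, 0, 1]:
--                 for dx in [-1, 0, 1]:
--                     if dx == 0 and dy == 0:
--                         continue
--
--                     nx, ny = x + dx, y + dy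
--                     # check bounds
--                     if 0 <= nx < width and 0 <= ny < height:
--                         neighbor_height = heightmap[ny][nx]
--                         height_diff = abs(current_height - neighbor_height)
--
--                         if height_diff >= STEEP_SLOPE_THRESHOLD:
--                             is_steep = True
--                             break
--                 if is_steep:
--                     break
--
--             row.append(is_steep)
--         slopes.append(row)
--
--     return slopes
-- ===== SOURCE B (Python) =====
-- STEEP_SLOPE_THRESHOLD = 4
--
-- def calculate_slopes(heightmap):
--     # Precomputed pairwise "steep edge" masks (each adjacent pair tested once),
--     # then each cell reads its 8 incident edges from the masks.
--     width = len(heightmap[0])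
--     rows = [r[:width] for r in heightmap]
--     n = len(rows)
--
--     def pairs(a, b):
--         return [abs(u - v) >= STEEP_SLOPE_THRESHOLD for u, v in zip(a, b)]
--
--     H = [pairs(r, r[1:]) for r in rows]                                  # (y,x)-(y,x+1)
--     V = [pairs(rows[y], rows[y + 1]) for y in range(n - 1)]              # (y,x)-(y+1,x)
--     D1 = [pairs(rows[y], rows[y + 1][1:]) for y in range(n - 1)]         # (y,x)-(y+1,x+1)
--     D2 = [pairs(rows[y][1:], rows[y + 1]) for y in range(n - 1)]         # (y,x+1)-(y+1,x)
--
--     def at(masks, y, x):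
--         return 0 <= y < len(masks) and 0 <= x < len(masks[y]) and masks[y][x]
--
--     return [[at(H, y, x - 1) or at(H, y, x)
--              or at(V, y - 1, x) or at(V, y, x)
--              or at(D1, y - 1, x - 1) or at(D1, y, x)
--              or at(D2, y - 1, x) or at(D2, y, x - 1)
--              for x in range(width)]
--             for y in range(n)]
-- ===== Notes on version B (the rewrite author's own statement) =====
-- stated objective: alternative
-- what changed: Replaces A's per-cell scan of all 8 neighbors (with break) by precomputed horizontal/vertical/diagonal steep-edge masks built from zipped row pairs (each adjacent pair compared once), with each cell reading its 8 incident edges from the masks.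
import Mathlib
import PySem

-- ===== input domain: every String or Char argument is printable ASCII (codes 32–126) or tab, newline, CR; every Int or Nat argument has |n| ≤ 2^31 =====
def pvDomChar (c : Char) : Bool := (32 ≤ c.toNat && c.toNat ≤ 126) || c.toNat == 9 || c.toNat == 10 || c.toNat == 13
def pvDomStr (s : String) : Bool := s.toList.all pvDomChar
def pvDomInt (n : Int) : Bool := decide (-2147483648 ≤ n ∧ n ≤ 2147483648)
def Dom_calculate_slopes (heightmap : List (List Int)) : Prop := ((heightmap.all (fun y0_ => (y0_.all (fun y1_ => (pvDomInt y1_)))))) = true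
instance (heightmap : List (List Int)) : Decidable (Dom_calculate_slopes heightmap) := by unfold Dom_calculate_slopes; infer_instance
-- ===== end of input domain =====

-- B replaces A's per-cell 8-neighbor scan (with break) by precomputed steep-edge masks
-- built from zipped row pairs, each cell reading its 8 incident edges from the masks;
-- objective: alternative decomposition (same asymptotic cost).


-- ===== PORT A =====
-- heightmap[y][x] / heightmap[ny][nx]: every access A performs has its index
-- bounds-checked first (or guaranteed by Pre_), so the getD default is never used.
def pvGetH (hm : List (List Int)) (y x : Int) : Int :=
  PySem.List.pyGetD (PySem.List.pyGetD hm y ([] : List Int)) x 0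

-- inner "for dx in [-1, 0, 1]" with "continue" and "break" (break ≡ return true)
def aLoopDx (hm : List (List Int)) (w h cur y x dy : Int) : List Int → Bool
  | [] => false
  | dx :: rest =>
    if dx = 0 ∧ dy = 0 then aLoopDx hm w h cur y x dy rest
    else if 0 ≤ x + dx ∧ x + dx < w ∧ 0 ≤ y + dy ∧ y + dy < h then
      if 4 ≤ |cur - pvGetH hm (y + dy) (x + dx)| then true
      else aLoopDx hm w h cur y x dy rest
    else aLoopDx hm w h cur y x dy rest

-- outer "for dy in [-1, 0, 1]" with "if is_steep: break"
def aLoopDy (hm : List (List Int)) (w h cur y x : Int) : List Int → Bool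
  | [] => false
  | dy :: rest =>
    if aLoopDx hm w h cur y x dy [-1, 0, 1] then true
    else aLoopDy hm w h cur y x rest

def calculate_slopes (heightmap : List (List Int)) : List (List Bool) :=
  let h : Int := heightmap.length
  let w : Int := (PySem.List.pyGetD heightmap 0 ([] : List Int)).length
  (PySem.List.pyRange 0 h).map fun y =>
    (PySem.List.pyRange 0 w).map fun x =>
      aLoopDy heightmap w h (pvGetH heightmap y x) y x [-1, 0, 1]

-- ===== PORT B =====
-- pairs(a, b) = [abs(u - v) >= STEEP_SLOPE_THRESHOLD for u, v in zip(a, b)]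
def bPairs (a b : List Int) : List Bool :=
  (a.zip b).map fun uv => decide (4 ≤ |uv.1 - uv.2|)

-- at(masks, y, x) = 0 <= y < len(masks) and 0 <= x < len(masks[y]) and masks[y][x]
def bAt (masks : List (List Bool)) (y x : Int) : Bool :=
  if 0 ≤ y ∧ y < (masks.length : Int) then
    let m := PySem.List.pyGetD masks y ([] : List Bool)
    if 0 ≤ x ∧ x < (m.length : Int) then PySem.List.pyGetD m x false else false
  else false

def calculate_slopes_alt (heightmap : List (List Int)) : List (List Bool) :=
  let w : Int := (PySem.List.pyGetD heightmap 0 ([] : List Int)).length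
  let rows := heightmap.map fun r => PySem.List.slice r none (some w)
  let n : Int := rows.length
  let H := rows.map fun r => bPairs r (PySem.List.slice r (some 1) none)
  let V := (PySem.List.pyRange 0 (n - 1)).map fun y =>
    bPairs (PySem.List.pyGetD rows y []) (PySem.List.pyGetD rows (y + 1) [])
  let D1 := (PySem.List.pyRange 0 (n - 1)).map fun y =>
    bPairs (PySem.List.pyGetD rows y [])
      (PySem.List.slice (PySem.List.pyGetD rows (y + 1) []) (some 1) none)
  let D2 := (PySem.List.pyRange 0 (n - 1)).map fun y =>
    bPairs (PySem.List.slice (PySem.List.pyGetD rows y []) (some 1) none)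
      (PySem.List.pyGetD rows (y + 1) [])
  (PySem.List.pyRange 0 n).map fun y =>
    (PySem.List.pyRange 0 w).map fun x =>
      bAt H y (x - 1) || bAt H y x ||
      bAt V (y - 1) x || bAt V y x ||
      bAt D1 (y - 1) (x - 1) || bAt D1 y x ||
      bAt D2 (y - 1) x || bAt D2 y (x - 1)

-- ===== PRECONDITION & SPEC =====
-- Pre_ excludes exactly the inputs on which A raises IndexError: the empty heightmap
-- (heightmap[0]) and ragged heightmaps with some row shorter than row 0 (A indexes
-- every row at all x < len(heightmap[0])). A returns on everything else.
def Pre_calculate_slopes (heightmap : List (List Int)) : Prop :=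
  heightmap ≠ [] ∧ ∀ r ∈ heightmap, (heightmap.headD []).length ≤ r.length
instance (heightmap : List (List Int)) : Decidable (Pre_calculate_slopes heightmap) := by
  unfold Pre_calculate_slopes; infer_instance

def pvWitness_calculate_slopes : List (List Int) := [[0, 5, 5], [1, 1, 1]]

def Spec_calculate_slopes (heightmap : List (List Int)) (out : List (List Bool)) : Prop := out = calculate_slopes_alt heightmap
instance (heightmap : List (List Int)) (out : List (List Bool)) : Decidable (Spec_calculate_slopes heightmap out) := by unfold Spec_calculate_slopes; infer_instance

-- ===== CLAIM (what is proved, stated in full; the proofs are below) =====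
def Claim_equal_calculate_slopes : Prop := ∀ (heightmap : List (List Int)), Dom_calculate_slopes heightmap → Pre_calculate_slopes heightmap → Spec_calculate_slopes heightmap (calculate_slopes heightmap)

-- ===== LEMMAS AND PROOFS =====

-- the common per-cell value: some in-bounds 8-neighbor differs in height by ≥ 4
def pvSteep (hm : List (List Int)) (w h y x : Int) : Bool :=
  ([(-1, -1), (-1, 0), (-1, 1), (0, -1), (0, 1), (1, -1), (1, 0), (1, 1)] :
      List (Int × Int)).any fun d =>
    decide (0 ≤ x + d.2 ∧ x + d.2 < w ∧ 0 ≤ y + d.1 ∧ y + d.1 < h) &&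
    decide (4 ≤ |pvGetH hm y x - pvGetH hm (y + d.1) (x + d.2)|)

lemma if_if_or {P Q : Prop} [Decidable P] [Decidable Q] (b : Bool) :
    (if P then (if Q then true else b) else b) = (decide P && decide Q || b) := by
  split_ifs <;> simp_all
lemma aCell_eq_steep (hm : List (List Int)) (w h y x : Int) :
    aLoopDy hm w h (pvGetH hm y x) y x [-1, 0, 1] = pvSteep hm w h y x := by
  simp only [aLoopDy, aLoopDx, pvSteep, List.any_cons, List.any_nil,
    show ¬((-1 : Int) = 0 ∧ (-1 : Int) = 0) by norm_num,
    show ¬((0 : Int) = 0 ∧ (-1 : Int) = 0) by norm_num,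
    show ¬((1 : Int) = 0 ∧ (-1 : Int) = 0) by norm_num,
    show ¬((-1 : Int) = 0 ∧ (0 : Int) = 0) by norm_num,
    show ((0 : Int) = 0 ∧ (0 : Int) = 0) by norm_num,
    show ¬((1 : Int) = 0 ∧ (0 : Int) = 0) by norm_num,
    show ¬((-1 : Int) = 0 ∧ (1 : Int) = 0) by norm_num,
    show ¬((0 : Int) = 0 ∧ (1 : Int) = 0) by norm_num,
    show ¬((1 : Int) = 0 ∧ (1 : Int) = 0) by norm_num,
    if_neg, if_pos, if_if_or]
  simp [Bool.or_assoc]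
lemma a_eq_grid (hm : List (List Int)) :
    calculate_slopes hm =
      (List.range hm.length).map fun (j : Nat) =>
        (List.range (hm.getD 0 []).length).map fun (i : Nat) =>
          pvSteep hm (hm.getD 0 []).length hm.length j i := by
  unfold calculate_slopes
  simp only [PySem.List.pyGetD_zero, PySem.List.pyRange_zero_natCast, List.map_map,
    Function.comp_def, aCell_eq_steep]

lemma bAt_neg (M : List (List Bool)) (y x : Int) (hy : y < 0) : bAt M y x = false := by
  unfold bAt; rw [if_neg (by omega)]

lemma bAt_eval (M : List (List Bool)) (j : Nat) (hj : j < M.length) (x : Int) :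
    bAt M ↑j x =
      ((decide (0 ≤ x) && decide (x < ((M[j]).length : Int))) &&
        (M[j]).getD x.toNat false) := by
  unfold bAt
  rw [if_pos (by exact ⟨by positivity, by exact_mod_cast hj⟩)]
  simp only [PySem.List.pyGetD_natCast, List.getD_eq_getElem _ _ hj]
  by_cases h0 : 0 ≤ x
  · by_cases h1 : x < ((M[j]).length : Int)
    · rw [if_pos ⟨h0, h1⟩, PySem.List.pyGetD_eq_getElem _ _ h0 h1]
      simp [h0, h1, List.getD_eq_getElem, show x.toNat < (M[j]).length by omega]
    · rw [if_neg (by tauto)]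
      simp only [List.getD_eq_getElem?_getD]
      rw [List.getElem?_eq_none (by omega)]
      simp [h1]
  · rw [if_neg (by tauto)]; simp [h0]

lemma length_bPairs (a b : List Int) : (bPairs a b).length = min a.length b.length := by
  simp [bPairs]

lemma getD_bPairs (a b : List Int) (k : Nat) (hk : k < min a.length b.length) :
    (bPairs a b).getD k false = decide (4 ≤ |a.getD k 0 - b.getD k 0|) := by
  have ha : k < a.length := by omega
  have hb : k < b.length := by omega
  rw [List.getD_eq_getElem _ _ (by simp [length_bPairs]; omega)]
  simp [bPairs, List.getElem_zip, List.getD_eq_getElem?_getD, List.getElem?_eq_getElem ha, List.getElem?_eq_getElem hb]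

lemma bAt_oob (M : List (List Bool)) (y x : Int) (hy : (M.length : Int) ≤ y) : bAt M y x = false := by
  unfold bAt; rw [if_neg (by omega)]

lemma getD_take (r : List Int) (n k : Nat) (hk : k < n) : (r.take n).getD k 0 = r.getD k 0 := by
  simp [List.getD_eq_getElem?_getD, List.getElem?_take, hk]

lemma getD_tail (r : List Int) (k : Nat) : r.tail.getD k 0 = r.getD (k + 1) 0 := by
  simp [List.getD_eq_getElem?_getD, List.getElem?_tail]

lemma maskH_eval (hm : List (List Int)) (W : Nat) (hW : 1 ≤ W)
    (hlen : ∀ r ∈ hm, W ≤ r.length) (j : Nat) (hj : j < hm.length) (t : Int) :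
    bAt (List.map (fun r => bPairs (List.take W r) (List.take W r).tail) hm) ↑j t =
      (decide (0 ≤ t ∧ t < (W : Int) - 1) &&
        decide (4 ≤ |(hm.getD j []).getD t.toNat 0 - (hm.getD j []).getD (t.toNat + 1) 0|)) := by
  have hjm : hm[j] ∈ hm := List.getElem_mem hj
  have hrl : W ≤ hm[j].length := hlen _ hjm
  have hlt : (List.take W hm[j]).length = W := by simp; omega
  rw [bAt_eval _ j (by simpa using hj) t]
  simp only [List.getElem_map, length_bPairs, hlt, List.length_tail, hlt]
  have hmin : min W (W - 1) = W - 1 := by omega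
  rw [hmin]
  by_cases hp : 0 ≤ t ∧ t < (W : Int) - 1
  · have hk : t.toNat < W - 1 := by omega
    rw [getD_bPairs _ _ _ (by simp [hlt, hmin]; omega)]
    rw [getD_take _ _ _ (by omega), getD_tail, getD_take _ _ _ (by omega)]
    have : hm[j] = hm.getD j [] := (List.getD_eq_getElem hm [] hj).symm
    rw [this]
    simp [hp.1, show t < ((W - 1 : Nat) : Int) by omega, hp]
  · have : (decide (0 ≤ t) && decide (t < ((W - 1 : Nat) : Int))) = false := by
      rcases not_and_or.mp hp with h | h
      · simp [h]
      · simp; omega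
    rw [this]
    simp [hp]

lemma rows_getD (hm : List (List Int)) (W k : Nat) (hk : k < hm.length) :
    (List.map (fun r => List.take W r) hm).getD k [] = List.take W (hm.getD k []) := by
  rw [List.getD_eq_getElem _ _ (by simpa using hk), List.getElem_map, List.getD_eq_getElem _ _ hk]

lemma row_len (hm : List (List Int)) (W k : Nat) (hk : k < hm.length)
    (hlen : ∀ r ∈ hm, W ≤ r.length) : (List.take W (hm.getD k [])).length = W := by
  have h2 : W ≤ (hm.getD k []).length :=
    hlen _ (by rw [List.getD_eq_getElem _ _ hk]; exact List.getElem_mem hk)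
  rw [List.length_take]; omega

lemma maskV_eval (hm : List (List Int)) (W : Nat)
    (hlen : ∀ r ∈ hm, W ≤ r.length) (j : Nat) (hj : j < hm.length - 1) (t : Int) :
    bAt (List.map (fun x => bPairs ((List.map (fun r => List.take W r) hm).getD x [])
        ((List.map (fun r => List.take W r) hm).getD (x + 1) [])) (List.range (hm.length - 1))) ↑j t =
      (decide (0 ≤ t ∧ t < (W : Int)) &&
        decide (4 ≤ |(hm.getD j []).getD t.toNat 0 - (hm.getD (j + 1) []).getD t.toNat 0|)) := by
  rw [bAt_eval _ j (by simpa using hj) t]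
  simp only [List.getElem_map, List.getElem_range, length_bPairs]
  rw [rows_getD _ _ _ (by omega), rows_getD _ _ _ (by omega),
    row_len _ _ _ (by omega) hlen, row_len _ _ _ (by omega) hlen]
  simp only [min_self]
  by_cases hp : 0 ≤ t ∧ t < (W : Int)
  · have hk : t.toNat < W := by omega
    rw [getD_bPairs _ _ _ (by rw [row_len _ _ _ (by omega) hlen, row_len _ _ _ (by omega) hlen]; omega)]
    rw [getD_take _ _ _ hk, getD_take _ _ _ hk]
    simp [hp.1, hp.2, hp]
  · have : (decide (0 ≤ t) && decide (t < (W : Int))) = false := by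
      rcases not_and_or.mp hp with h | h <;> simp [h]
    rw [this]
    simp [hp]

lemma maskD1_eval (hm : List (List Int)) (W : Nat) (hW : 1 ≤ W)
    (hlen : ∀ r ∈ hm, W ≤ r.length) (j : Nat) (hj : j < hm.length - 1) (t : Int) :
    bAt (List.map (fun x => bPairs ((List.map (fun r => List.take W r) hm).getD x [])
        ((List.map (fun r => List.take W r) hm).getD (x + 1) []).tail) (List.range (hm.length - 1))) ↑j t =
      (decide (0 ≤ t ∧ t < (W : Int) - 1) &&
        decide (4 ≤ |(hm.getD j []).getD t.toNat 0 - (hm.getD (j + 1) []).getD (t.toNat + 1) 0|)) := by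
  rw [bAt_eval _ j (by simpa using hj) t]
  simp only [List.getElem_map, List.getElem_range, length_bPairs, List.length_tail]
  rw [rows_getD _ _ _ (by omega), rows_getD _ _ _ (by omega),
    row_len _ _ _ (by omega) hlen, row_len _ _ _ (by omega) hlen]
  have hmin : min W (W - 1) = W - 1 := by omega
  rw [hmin]
  by_cases hp : 0 ≤ t ∧ t < (W : Int) - 1
  · have hk : t.toNat < W - 1 := by omega
    rw [getD_bPairs _ _ _ (by
      rw [row_len _ _ _ (by omega) hlen, List.length_tail, row_len _ _ _ (by omega) hlen]; omega)]
    rw [getD_take _ _ _ (by omega), getD_tail, getD_take _ _ _ (by omega)]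
    simp [hp.1, show t < ((W - 1 : Nat) : Int) by omega, hp]
  · have : (decide (0 ≤ t) && decide (t < ((W - 1 : Nat) : Int))) = false := by
      rcases not_and_or.mp hp with h | h
      · simp [h]
      · simp; omega
    rw [this]
    simp [hp]

lemma maskD2_eval (hm : List (List Int)) (W : Nat) (hW : 1 ≤ W)
    (hlen : ∀ r ∈ hm, W ≤ r.length) (j : Nat) (hj : j < hm.length - 1) (t : Int) :
    bAt (List.map (fun x => bPairs ((List.map (fun r => List.take W r) hm).getD x []).tail
        ((List.map (fun r => List.take W r) hm).getD (x + 1) [])) (List.range (hm.length - 1))) ↑j t =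
      (decide (0 ≤ t ∧ t < (W : Int) - 1) &&
        decide (4 ≤ |(hm.getD j []).getD (t.toNat + 1) 0 - (hm.getD (j + 1) []).getD t.toNat 0|)) := by
  rw [bAt_eval _ j (by simpa using hj) t]
  simp only [List.getElem_map, List.getElem_range, length_bPairs, List.length_tail]
  rw [rows_getD _ _ _ (by omega), rows_getD _ _ _ (by omega),
    row_len _ _ _ (by omega) hlen, row_len _ _ _ (by omega) hlen]
  have hmin : min (W - 1) W = W - 1 := by omega
  rw [hmin]
  by_cases hp : 0 ≤ t ∧ t < (W : Int) - 1
  · have hk : t.toNat < W - 1 := by omega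
    rw [getD_bPairs _ _ _ (by
      rw [List.length_tail, row_len _ _ _ (by omega) hlen, row_len _ _ _ (by omega) hlen]; omega)]
    rw [getD_tail, getD_take _ _ _ (by omega), getD_take _ _ _ (by omega)]
    simp [hp.1, show t < ((W - 1 : Nat) : Int) by omega, hp]
  · have : (decide (0 ≤ t) && decide (t < ((W - 1 : Nat) : Int))) = false := by
      rcases not_and_or.mp hp with h | h
      · simp [h]
      · simp; omega
    rw [this]
    simp [hp]

lemma pvGetH_cast (hm : List (List Int)) (a b : Nat) :
    pvGetH hm ↑a ↑b = (hm.getD a []).getD b 0 := by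
  simp [pvGetH, PySem.List.pyGetD_natCast]

lemma bAt_neg_one (M : List (List Bool)) (x : Int) : bAt M (-1) x = false :=
  bAt_neg _ _ _ (by norm_num)

lemma maskV_oob (hm : List (List Int)) (W : Nat) (y x : Int)
    (hy : ((hm.length - 1 : Nat) : Int) ≤ y) :
    bAt (List.map (fun x => bPairs ((List.map (fun r => List.take W r) hm).getD x [])
        ((List.map (fun r => List.take W r) hm).getD (x + 1) [])) (List.range (hm.length - 1))) y x = false :=
  bAt_oob _ _ _ (by simpa using hy)

lemma maskD1_oob (hm : List (List Int)) (W : Nat) (y x : Int)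
    (hy : ((hm.length - 1 : Nat) : Int) ≤ y) :
    bAt (List.map (fun x => bPairs ((List.map (fun r => List.take W r) hm).getD x [])
        ((List.map (fun r => List.take W r) hm).getD (x + 1) []).tail) (List.range (hm.length - 1))) y x = false :=
  bAt_oob _ _ _ (by simpa using hy)

lemma maskD2_oob (hm : List (List Int)) (W : Nat) (y x : Int)
    (hy : ((hm.length - 1 : Nat) : Int) ≤ y) :
    bAt (List.map (fun x => bPairs ((List.map (fun r => List.take W r) hm).getD x []).tail
        ((List.map (fun r => List.take W r) hm).getD (x + 1) [])) (List.range (hm.length - 1))) y x = false :=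
  bAt_oob _ _ _ (by simpa using hy)

set_option maxHeartbeats 1600000 in
lemma b_eq_grid (hm : List (List Int)) (hpre : Pre_calculate_slopes hm) :
    calculate_slopes_alt hm =
      (List.range hm.length).map fun (j : Nat) =>
        (List.range (hm.getD 0 []).length).map fun (i : Nat) =>
          pvSteep hm (hm.getD 0 []).length hm.length j i := by
  obtain ⟨hne, hlen⟩ := hpre
  have hN : 1 ≤ hm.length := by cases hm <;> simp_all
  have hlen' : ∀ r ∈ hm, (hm.getD 0 []).length ≤ r.length := by
    cases hm with
    | nil => simp
    | cons a l => simpa using hlen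
  unfold calculate_slopes_alt
  simp only [PySem.List.pyGetD_zero, PySem.List.slice_to_natCast, PySem.List.slice_from_one,
    List.length_map, show ((hm.length : Int) - 1) = ((hm.length - 1 : Nat) : Int) by omega,
    PySem.List.pyRange_zero_natCast, List.map_map, Function.comp_def,
    PySem.List.pyGetD_natCast, ← Nat.cast_add_one]
  apply List.map_congr_left
  intro j hj
  rw [List.mem_range] at hj
  apply List.map_congr_left
  intro i hi
  rw [List.mem_range] at hi
  have hW : 1 ≤ (hm.getD 0 []).length := by omega
  by_cases hj0 : 0 < j
  · by_cases hj1 : j + 1 < hm.length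
    · rw [show ((j:Int) - 1) = ((j - 1 : Nat) : Int) by omega]
      rw [maskH_eval hm _ hW hlen' j hj (↑i - 1), maskH_eval hm _ hW hlen' j hj ↑i,
        maskV_eval hm _ hlen' (j-1) (by omega) ↑i, maskV_eval hm _ hlen' j (by omega) ↑i,
        maskD1_eval hm _ hW hlen' (j-1) (by omega) (↑i - 1), maskD1_eval hm _ hW hlen' j (by omega) ↑i,
        maskD2_eval hm _ hW hlen' (j-1) (by omega) ↑i, maskD2_eval hm _ hW hlen' j (by omega) (↑i - 1)]
      simp only [pvSteep, List.any_cons, List.any_nil, Bool.or_false]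
      rw [show ((j:Int) + -1) = ((j - 1 : Nat) : Int) by omega,
        show ((j:Int) + 1) = ((j + 1 : Nat) : Int) by push_cast; ring]
      simp only [show j - 1 + 1 = j from by omega]
      by_cases hi0 : 0 < i
      · rw [show ((i:Int) - 1) = ((i - 1 : Nat) : Int) by omega,
          show ((i:Int) + -1) = ((i - 1 : Nat) : Int) by omega,
          show ((i:Int) + 1) = ((i + 1 : Nat) : Int) by push_cast; ring]
        simp only [add_zero, pvGetH_cast, Int.toNat_natCast]
        simp only [show i - 1 + 1 = i from by omega]
        by_cases hi1 : i + 1 < (hm.getD 0 []).length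
        · rw [Bool.eq_iff_iff]
          simp only [Bool.or_eq_true, Bool.and_eq_true, decide_eq_true_eq]
          simp only [
            show ((i - 1 : Nat) : Int) < ((hm.getD 0 []).length : Int) - 1 by omega,
            show ((i - 1 : Nat) : Int) < ((hm.getD 0 []).length : Int) by omega,
            show ((i : Nat) : Int) < ((hm.getD 0 []).length : Int) - 1 by omega,
            show ((i : Nat) : Int) < ((hm.getD 0 []).length : Int) by omega,
            show ((i + 1 : Nat) : Int) < ((hm.getD 0 []).length : Int) by omega,
            show ((j - 1 : Nat) : Int) < ((hm.length : Nat) : Int) by omega,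
            show ((j : Nat) : Int) < ((hm.length : Nat) : Int) by omega,
            show ((j + 1 : Nat) : Int) < ((hm.length : Nat) : Int) by omega,
            Int.natCast_nonneg, abs_sub_comm, true_and, and_true, false_and, and_false, or_false, false_or]
          try tauto
        · rw [Bool.eq_iff_iff]
          simp only [Bool.or_eq_true, Bool.and_eq_true, decide_eq_true_eq]
          simp only [
            show ((i - 1 : Nat) : Int) < ((hm.getD 0 []).length : Int) - 1 by omega,
            show ((i - 1 : Nat) : Int) < ((hm.getD 0 []).length : Int) by omega,
            show ¬(((i : Nat) : Int) < ((hm.getD 0 []).length : Int) - 1) by omega,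
            show ((i : Nat) : Int) < ((hm.getD 0 []).length : Int) by omega,
            show ¬(((i + 1 : Nat) : Int) < ((hm.getD 0 []).length : Int)) by omega,
            show ((j - 1 : Nat) : Int) < ((hm.length : Nat) : Int) by omega,
            show ((j : Nat) : Int) < ((hm.length : Nat) : Int) by omega,
            show ((j + 1 : Nat) : Int) < ((hm.length : Nat) : Int) by omega,
            Int.natCast_nonneg, abs_sub_comm, true_and, and_true, false_and, and_false, or_false, false_or]
          try tauto
      · rw [show ((i:Int) - 1) = (-1 : Int) by omega,
          show ((i:Int) + -1) = (-1 : Int) by omega,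
          show ((i:Int) + 1) = ((i + 1 : Nat) : Int) by push_cast; ring]
        simp only [add_zero, pvGetH_cast, Int.toNat_natCast]
        by_cases hi1 : i + 1 < (hm.getD 0 []).length
        · rw [Bool.eq_iff_iff]
          simp only [Bool.or_eq_true, Bool.and_eq_true, decide_eq_true_eq]
          simp only [
            show ¬((0:Int) ≤ -1) by norm_num,
            show ((i : Nat) : Int) < ((hm.getD 0 []).length : Int) - 1 by omega,
            show ((i : Nat) : Int) < ((hm.getD 0 []).length : Int) by omega,
            show ((i + 1 : Nat) : Int) < ((hm.getD 0 []).length : Int) by omega,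
            show ((j - 1 : Nat) : Int) < ((hm.length : Nat) : Int) by omega,
            show ((j : Nat) : Int) < ((hm.length : Nat) : Int) by omega,
            show ((j + 1 : Nat) : Int) < ((hm.length : Nat) : Int) by omega,
            Int.natCast_nonneg, abs_sub_comm, true_and, and_true, false_and, and_false, or_false, false_or]
          try tauto
        · rw [Bool.eq_iff_iff]
          simp only [Bool.or_eq_true, Bool.and_eq_true, decide_eq_true_eq]
          simp only [
            show ¬((0:Int) ≤ -1) by norm_num,
            show ¬(((i : Nat) : Int) < ((hm.getD 0 []).length : Int) - 1) by omega,
            show ((i : Nat) : Int) < ((hm.getD 0 []).length : Int) by omega,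
            show ¬(((i + 1 : Nat) : Int) < ((hm.getD 0 []).length : Int)) by omega,
            show ((j - 1 : Nat) : Int) < ((hm.length : Nat) : Int) by omega,
            show ((j : Nat) : Int) < ((hm.length : Nat) : Int) by omega,
            show ((j + 1 : Nat) : Int) < ((hm.length : Nat) : Int) by omega,
            Int.natCast_nonneg, abs_sub_comm, true_and, and_true, false_and, and_false, or_false, false_or]
          try tauto
    · rw [show ((j:Int) - 1) = ((j - 1 : Nat) : Int) by omega]
      rw [maskH_eval hm _ hW hlen' j hj (↑i - 1), maskH_eval hm _ hW hlen' j hj ↑i,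
        maskV_eval hm _ hlen' (j-1) (by omega) ↑i, maskV_oob hm _ ↑j ↑i (by omega),
        maskD1_eval hm _ hW hlen' (j-1) (by omega) (↑i - 1), maskD1_oob hm _ ↑j ↑i (by omega),
        maskD2_eval hm _ hW hlen' (j-1) (by omega) ↑i, maskD2_oob hm _ ↑j (↑i - 1) (by omega)]
      simp only [pvSteep, List.any_cons, List.any_nil, Bool.or_false]
      rw [show ((j:Int) + -1) = ((j - 1 : Nat) : Int) by omega,
        show ((j:Int) + 1) = ((j + 1 : Nat) : Int) by push_cast; ring]
      simp only [show j - 1 + 1 = j from by omega, Bool.false_or, Bool.or_false]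
      by_cases hi0 : 0 < i
      · rw [show ((i:Int) - 1) = ((i - 1 : Nat) : Int) by omega,
          show ((i:Int) + -1) = ((i - 1 : Nat) : Int) by omega,
          show ((i:Int) + 1) = ((i + 1 : Nat) : Int) by push_cast; ring]
        simp only [add_zero, pvGetH_cast, Int.toNat_natCast]
        simp only [show i - 1 + 1 = i from by omega]
        by_cases hi1 : i + 1 < (hm.getD 0 []).length
        · rw [Bool.eq_iff_iff]
          simp only [Bool.or_eq_true, Bool.and_eq_true, decide_eq_true_eq]
          simp only [
            show ((i - 1 : Nat) : Int) < ((hm.getD 0 []).length : Int) - 1 by omega,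
            show ((i - 1 : Nat) : Int) < ((hm.getD 0 []).length : Int) by omega,
            show ((i : Nat) : Int) < ((hm.getD 0 []).length : Int) - 1 by omega,
            show ((i : Nat) : Int) < ((hm.getD 0 []).length : Int) by omega,
            show ((i + 1 : Nat) : Int) < ((hm.getD 0 []).length : Int) by omega,
            show ((j - 1 : Nat) : Int) < ((hm.length : Nat) : Int) by omega,
            show ((j : Nat) : Int) < ((hm.length : Nat) : Int) by omega,
            show ¬(((j + 1 : Nat) : Int) < ((hm.length : Nat) : Int)) by omega,
            Int.natCast_nonneg, abs_sub_comm, true_and, and_true, false_and, and_false, or_false, false_or]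
          try tauto
        · rw [Bool.eq_iff_iff]
          simp only [Bool.or_eq_true, Bool.and_eq_true, decide_eq_true_eq]
          simp only [
            show ((i - 1 : Nat) : Int) < ((hm.getD 0 []).length : Int) - 1 by omega,
            show ((i - 1 : Nat) : Int) < ((hm.getD 0 []).length : Int) by omega,
            show ¬(((i : Nat) : Int) < ((hm.getD 0 []).length : Int) - 1) by omega,
            show ((i : Nat) : Int) < ((hm.getD 0 []).length : Int) by omega,
            show ¬(((i + 1 : Nat) : Int) < ((hm.getD 0 []).length : Int)) by omega,
            show ((j - 1 : Nat) : Int) < ((hm.length : Nat) : Int) by omega,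
            show ((j : Nat) : Int) < ((hm.length : Nat) : Int) by omega,
            show ¬(((j + 1 : Nat) : Int) < ((hm.length : Nat) : Int)) by omega,
            Int.natCast_nonneg, abs_sub_comm, true_and, and_true, false_and, and_false, or_false, false_or]
          try tauto
      · rw [show ((i:Int) - 1) = (-1 : Int) by omega,
          show ((i:Int) + -1) = (-1 : Int) by omega,
          show ((i:Int) + 1) = ((i + 1 : Nat) : Int) by push_cast; ring]
        simp only [add_zero, pvGetH_cast, Int.toNat_natCast]
        by_cases hi1 : i + 1 < (hm.getD 0 []).length
        · rw [Bool.eq_iff_iff]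
          simp only [Bool.or_eq_true, Bool.and_eq_true, decide_eq_true_eq]
          simp only [
            show ¬((0:Int) ≤ -1) by norm_num,
            show ((i : Nat) : Int) < ((hm.getD 0 []).length : Int) - 1 by omega,
            show ((i : Nat) : Int) < ((hm.getD 0 []).length : Int) by omega,
            show ((i + 1 : Nat) : Int) < ((hm.getD 0 []).length : Int) by omega,
            show ((j - 1 : Nat) : Int) < ((hm.length : Nat) : Int) by omega,
            show ((j : Nat) : Int) < ((hm.length : Nat) : Int) by omega,
            show ¬(((j + 1 : Nat) : Int) < ((hm.length : Nat) : Int)) by omega,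
            Int.natCast_nonneg, abs_sub_comm, true_and, and_true, false_and, and_false, or_false, false_or]
          try tauto
        · rw [Bool.eq_iff_iff]
          simp only [Bool.or_eq_true, Bool.and_eq_true, decide_eq_true_eq]
          simp only [
            show ¬((0:Int) ≤ -1) by norm_num,
            show ¬(((i : Nat) : Int) < ((hm.getD 0 []).length : Int) - 1) by omega,
            show ((i : Nat) : Int) < ((hm.getD 0 []).length : Int) by omega,
            show ¬(((i + 1 : Nat) : Int) < ((hm.getD 0 []).length : Int)) by omega,
            show ((j - 1 : Nat) : Int) < ((hm.length : Nat) : Int) by omega,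
            show ((j : Nat) : Int) < ((hm.length : Nat) : Int) by omega,
            show ¬(((j + 1 : Nat) : Int) < ((hm.length : Nat) : Int)) by omega,
            Int.natCast_nonneg, abs_sub_comm, true_and, and_true, false_and, and_false, or_false, false_or]
          try tauto
  · by_cases hj1 : j + 1 < hm.length
    · rw [show ((j:Int) - 1) = (-1 : Int) by omega]
      simp only [bAt_neg_one]
      rw [maskH_eval hm _ hW hlen' j hj (↑i - 1), maskH_eval hm _ hW hlen' j hj ↑i,
        maskV_eval hm _ hlen' j (by omega) ↑i,
        maskD1_eval hm _ hW hlen' j (by omega) ↑i,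
        maskD2_eval hm _ hW hlen' j (by omega) (↑i - 1)]
      simp only [pvSteep, List.any_cons, List.any_nil, Bool.or_false]
      rw [show ((j:Int) + -1) = (-1 : Int) by omega,
        show ((j:Int) + 1) = ((j + 1 : Nat) : Int) by push_cast; ring]
      try simp only [Bool.false_or, Bool.or_false]
      by_cases hi0 : 0 < i
      · rw [show ((i:Int) - 1) = ((i - 1 : Nat) : Int) by omega,
          show ((i:Int) + -1) = ((i - 1 : Nat) : Int) by omega,
          show ((i:Int) + 1) = ((i + 1 : Nat) : Int) by push_cast; ring]
        simp only [add_zero, pvGetH_cast, Int.toNat_natCast]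
        simp only [show i - 1 + 1 = i from by omega]
        by_cases hi1 : i + 1 < (hm.getD 0 []).length
        · rw [Bool.eq_iff_iff]
          simp only [Bool.or_eq_true, Bool.and_eq_true, decide_eq_true_eq]
          simp only [
            show ((i - 1 : Nat) : Int) < ((hm.getD 0 []).length : Int) - 1 by omega,
            show ((i - 1 : Nat) : Int) < ((hm.getD 0 []).length : Int) by omega,
            show ((i : Nat) : Int) < ((hm.getD 0 []).length : Int) - 1 by omega,
            show ((i : Nat) : Int) < ((hm.getD 0 []).length : Int) by omega,
            show ((i + 1 : Nat) : Int) < ((hm.getD 0 []).length : Int) by omega,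
            show ¬((0:Int) ≤ (-1:Int)) by norm_num,
            show ((j : Nat) : Int) < ((hm.length : Nat) : Int) by omega,
            show ((j + 1 : Nat) : Int) < ((hm.length : Nat) : Int) by omega,
            Int.natCast_nonneg, abs_sub_comm, true_and, and_true, false_and, and_false, or_false, false_or]
          try tauto
        · rw [Bool.eq_iff_iff]
          simp only [Bool.or_eq_true, Bool.and_eq_true, decide_eq_true_eq]
          simp only [
            show ((i - 1 : Nat) : Int) < ((hm.getD 0 []).length : Int) - 1 by omega,
            show ((i - 1 : Nat) : Int) < ((hm.getD 0 []).length : Int) by omega,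
            show ¬(((i : Nat) : Int) < ((hm.getD 0 []).length : Int) - 1) by omega,
            show ((i : Nat) : Int) < ((hm.getD 0 []).length : Int) by omega,
            show ¬(((i + 1 : Nat) : Int) < ((hm.getD 0 []).length : Int)) by omega,
            show ¬((0:Int) ≤ (-1:Int)) by norm_num,
            show ((j : Nat) : Int) < ((hm.length : Nat) : Int) by omega,
            show ((j + 1 : Nat) : Int) < ((hm.length : Nat) : Int) by omega,
            Int.natCast_nonneg, abs_sub_comm, true_and, and_true, false_and, and_false, or_false, false_or]
          try tauto
      · rw [show ((i:Int) - 1) = (-1 : Int) by omega,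
          show ((i:Int) + -1) = (-1 : Int) by omega,
          show ((i:Int) + 1) = ((i + 1 : Nat) : Int) by push_cast; ring]
        simp only [add_zero, pvGetH_cast, Int.toNat_natCast]
        by_cases hi1 : i + 1 < (hm.getD 0 []).length
        · rw [Bool.eq_iff_iff]
          simp only [Bool.or_eq_true, Bool.and_eq_true, decide_eq_true_eq]
          simp only [
            show ¬((0:Int) ≤ -1) by norm_num,
            show ((i : Nat) : Int) < ((hm.getD 0 []).length : Int) - 1 by omega,
            show ((i : Nat) : Int) < ((hm.getD 0 []).length : Int) by omega,
            show ((i + 1 : Nat) : Int) < ((hm.getD 0 []).length : Int) by omega,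
            show ¬((0:Int) ≤ (-1:Int)) by norm_num,
            show ((j : Nat) : Int) < ((hm.length : Nat) : Int) by omega,
            show ((j + 1 : Nat) : Int) < ((hm.length : Nat) : Int) by omega,
            Int.natCast_nonneg, abs_sub_comm, true_and, and_true, false_and, and_false, or_false, false_or]
          try tauto
        · rw [Bool.eq_iff_iff]
          simp only [Bool.or_eq_true, Bool.and_eq_true, decide_eq_true_eq]
          simp only [
            show ¬((0:Int) ≤ -1) by norm_num,
            show ¬(((i : Nat) : Int) < ((hm.getD 0 []).length : Int) - 1) by omega,
            show ((i : Nat) : Int) < ((hm.getD 0 []).length : Int) by omega,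
            show ¬(((i + 1 : Nat) : Int) < ((hm.getD 0 []).length : Int)) by omega,
            show ¬((0:Int) ≤ (-1:Int)) by norm_num,
            show ((j : Nat) : Int) < ((hm.length : Nat) : Int) by omega,
            show ((j + 1 : Nat) : Int) < ((hm.length : Nat) : Int) by omega,
            Int.natCast_nonneg, abs_sub_comm, true_and, and_true, false_and, and_false, or_false, false_or]
          try tauto
    · rw [show ((j:Int) - 1) = (-1 : Int) by omega]
      simp only [bAt_neg_one]
      rw [maskH_eval hm _ hW hlen' j hj (↑i - 1), maskH_eval hm _ hW hlen' j hj ↑i,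
        maskV_oob hm _ ↑j ↑i (by omega),
        maskD1_oob hm _ ↑j ↑i (by omega),
        maskD2_oob hm _ ↑j (↑i - 1) (by omega)]
      simp only [pvSteep, List.any_cons, List.any_nil, Bool.or_false]
      rw [show ((j:Int) + -1) = (-1 : Int) by omega,
        show ((j:Int) + 1) = ((j + 1 : Nat) : Int) by push_cast; ring]
      try simp only [Bool.false_or, Bool.or_false]
      by_cases hi0 : 0 < i
      · rw [show ((i:Int) - 1) = ((i - 1 : Nat) : Int) by omega,
          show ((i:Int) + -1) = ((i - 1 : Nat) : Int) by omega,
          show ((i:Int) + 1) = ((i + 1 : Nat) : Int) by push_cast; ring]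
        simp only [add_zero, pvGetH_cast, Int.toNat_natCast]
        simp only [show i - 1 + 1 = i from by omega]
        by_cases hi1 : i + 1 < (hm.getD 0 []).length
        · rw [Bool.eq_iff_iff]
          simp only [Bool.or_eq_true, Bool.and_eq_true, decide_eq_true_eq]
          simp only [
            show ((i - 1 : Nat) : Int) < ((hm.getD 0 []).length : Int) - 1 by omega,
            show ((i - 1 : Nat) : Int) < ((hm.getD 0 []).length : Int) by omega,
            show ((i : Nat) : Int) < ((hm.getD 0 []).length : Int) - 1 by omega,
            show ((i : Nat) : Int) < ((hm.getD 0 []).length : Int) by omega,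
            show ((i + 1 : Nat) : Int) < ((hm.getD 0 []).length : Int) by omega,
            show ¬((0:Int) ≤ (-1:Int)) by norm_num,
            show ((j : Nat) : Int) < ((hm.length : Nat) : Int) by omega,
            show ¬(((j + 1 : Nat) : Int) < ((hm.length : Nat) : Int)) by omega,
            Int.natCast_nonneg, abs_sub_comm, true_and, and_true, false_and, and_false, or_false, false_or]
          try tauto
        · rw [Bool.eq_iff_iff]
          simp only [Bool.or_eq_true, Bool.and_eq_true, decide_eq_true_eq]
          simp only [
            show ((i - 1 : Nat) : Int) < ((hm.getD 0 []).length : Int) - 1 by omega,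
            show ((i - 1 : Nat) : Int) < ((hm.getD 0 []).length : Int) by omega,
            show ¬(((i : Nat) : Int) < ((hm.getD 0 []).length : Int) - 1) by omega,
            show ((i : Nat) : Int) < ((hm.getD 0 []).length : Int) by omega,
            show ¬(((i + 1 : Nat) : Int) < ((hm.getD 0 []).length : Int)) by omega,
            show ¬((0:Int) ≤ (-1:Int)) by norm_num,
            show ((j : Nat) : Int) < ((hm.length : Nat) : Int) by omega,
            show ¬(((j + 1 : Nat) : Int) < ((hm.length : Nat) : Int)) by omega,
            Int.natCast_nonneg, abs_sub_comm, true_and, and_true, false_and, and_false, or_false, false_or]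
          try tauto
      · rw [show ((i:Int) - 1) = (-1 : Int) by omega,
          show ((i:Int) + -1) = (-1 : Int) by omega,
          show ((i:Int) + 1) = ((i + 1 : Nat) : Int) by push_cast; ring]
        simp only [add_zero, pvGetH_cast, Int.toNat_natCast]
        by_cases hi1 : i + 1 < (hm.getD 0 []).length
        · rw [Bool.eq_iff_iff]
          simp only [Bool.or_eq_true, Bool.and_eq_true, decide_eq_true_eq]
          simp only [
            show ¬((0:Int) ≤ -1) by norm_num,
            show ((i : Nat) : Int) < ((hm.getD 0 []).length : Int) - 1 by omega,
            show ((i : Nat) : Int) < ((hm.getD 0 []).length : Int) by omega,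
            show ((i + 1 : Nat) : Int) < ((hm.getD 0 []).length : Int) by omega,
            show ¬((0:Int) ≤ (-1:Int)) by norm_num,
            show ((j : Nat) : Int) < ((hm.length : Nat) : Int) by omega,
            show ¬(((j + 1 : Nat) : Int) < ((hm.length : Nat) : Int)) by omega,
            Int.natCast_nonneg, abs_sub_comm, true_and, and_true, false_and, and_false, or_false, false_or]
          try tauto
        · rw [Bool.eq_iff_iff]
          simp only [Bool.or_eq_true, Bool.and_eq_true, decide_eq_true_eq]
          simp only [
            show ¬((0:Int) ≤ -1) by norm_num,
            show ¬(((i : Nat) : Int) < ((hm.getD 0 []).length : Int) - 1) by omega,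
            show ((i : Nat) : Int) < ((hm.getD 0 []).length : Int) by omega,
            show ¬(((i + 1 : Nat) : Int) < ((hm.getD 0 []).length : Int)) by omega,
            show ¬((0:Int) ≤ (-1:Int)) by norm_num,
            show ((j : Nat) : Int) < ((hm.length : Nat) : Int) by omega,
            show ¬(((j + 1 : Nat) : Int) < ((hm.length : Nat) : Int)) by omega,
            Int.natCast_nonneg, abs_sub_comm, true_and, and_true, false_and, and_false, or_false, false_or]
          try tauto

-- ===== VERDICT (by name: the statement is the Claim_ definition above) =====
theorem calculate_slopes_spec : Claim_equal_calculate_slopes := by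
  intro hm _ hpre
  unfold Spec_calculate_slopes
  rw [a_eq_grid hm, b_eq_grid hm hpre]
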